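-- pv_equiv track=rewrite | github.com/praveentn/sigmoidian | utils/display.py | _fit_field
-- ===== SOURCE A (Python) =====
-- _FIELD_LIMIT = 1024
--
-- def _fit_field(lines: list[str], limit: int = _FIELD_LIMIT) -> str:
--     """Join lines into a field value, truncating with a count if it would exceed `limit`."""
--     result = ""
--     for i, line in enumerate(lines):
--         chunk = (line + "\n")
--         if len(result) + len(chunk) > limit - 20:  # leave room for overflow note
--             overflow = len(lines) - i
--             result += f"… +{overflow} more"
--             break
--         result += chunk
--     return result.strip() or "—"
-- ===== SOURCE B (Python) =====
-- _FIELD_LIMIT = 1024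
--
-- def _fit_field(lines: list[str], limit: int = _FIELD_LIMIT) -> str:
--     """Join lines into a field value, truncating with a count if it would exceed `limit`."""
--     budget = limit - 20
--     # inclusive prefix sums of chunk lengths (len(line) + 1 for the newline)
--     cums = []
--     t = 0
--     for line in lines:
--         t += len(line) + 1
--         cums.append(t)
--     # binary search (bisect_right): first index whose prefix sum exceeds the budget;
--     # correct because cums is strictly increasing (every chunk length is >= 1)
--     lo, hi = 0, len(cums)
--     while lo < hi:
--         mid = (lo + hi) // 2
--         if budget < cums[mid]:
--             hi = mid
--         else:
--             lo = mid + 1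
--     if lo == len(lines):
--         return "\n".join(lines).strip() or "—"
--     return "\n".join(lines[:lo] + [f"… +{len(lines) - lo} more"]).strip() or "—"
-- ===== Notes on version B (the rewrite author's own statement) =====
-- stated objective: alternative
-- what changed: B precomputes the inclusive prefix sums of chunk lengths and binary-searches (bisect_right by hand) for the first prefix sum exceeding limit-20, then builds the result once with a single '\n'.join, instead of A's streaming chunk-by-chunk string accumulation with an in-loop break.
import Mathlib
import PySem

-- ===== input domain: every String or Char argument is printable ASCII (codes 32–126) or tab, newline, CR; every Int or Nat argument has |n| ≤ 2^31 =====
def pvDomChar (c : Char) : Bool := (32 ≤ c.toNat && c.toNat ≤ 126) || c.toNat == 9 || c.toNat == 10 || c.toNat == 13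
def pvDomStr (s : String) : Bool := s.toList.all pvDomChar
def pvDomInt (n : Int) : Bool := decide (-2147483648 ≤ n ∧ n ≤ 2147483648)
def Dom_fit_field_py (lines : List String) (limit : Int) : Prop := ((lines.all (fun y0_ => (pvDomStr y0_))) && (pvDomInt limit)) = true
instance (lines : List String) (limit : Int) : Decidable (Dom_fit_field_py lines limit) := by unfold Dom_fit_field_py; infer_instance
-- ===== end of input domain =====

-- B replaces A's streaming chunk-by-chunk accumulation by prefix sums of chunk lengths,
-- a binary search (bisect_right by hand) for the cutoff, and one final '\n'-join;
-- same return value everywhere (objective: alternative algorithm).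

-- shared tail of both Pythons: the f-string note and `result.strip() or "—"`
def fitFieldNote (n : Int) : List Char :=
  "… +".toList ++ (PySem.Int.toStr n).toList ++ " more".toList

def fitFieldFinish (cs : List Char) : String :=
  let r := PySem.Chars.strip cs
  if r = [] then "—" else String.ofList r

-- ===== PORT A =====
-- A's loop: accumulate `result` chunk by chunk, break with the overflow note
def fitFieldLoopA (n budget : Int) : List String → Nat → List Char → List Char
  | [], _, result => result
  | line :: rest, i, result =>
    let chunk := line.toList ++ ['\n']
    if ((result.length + chunk.length : Nat) : Int) > budget then
      result ++ fitFieldNote (n - i)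
    else
      fitFieldLoopA n budget rest (i + 1) (result ++ chunk)

def fit_field_py (lines : List String) (limit : Int) : String :=
  fitFieldFinish (fitFieldLoopA (lines.length : Int) (limit - 20) lines 0 [])

-- ===== PORT B =====
-- B's first pass: inclusive prefix sums of the chunk lengths (len(line) + 1)
def fitCums : List String → Int → List Int
  | [], _ => []
  | line :: rest, t =>
    let t' := t + PySem.Str.len line + 1
    t' :: fitCums rest t'

-- B's binary search: Python's bisect_right loop written by hand
def fitBisect (a : List Int) (x : Int) (lo hi : Nat) : Nat :=
  if _h : lo < hi then
    let mid := (lo + hi) / 2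
    if x < a.getD mid 0 then fitBisect a x lo mid
    else fitBisect a x (mid + 1) hi
  else lo
termination_by hi - lo
decreasing_by all_goals omega

def fit_field_py_alt (lines : List String) (limit : Int) : String :=
  let budget := limit - 20
  let cums := fitCums lines 0
  let lo := fitBisect cums budget 0 cums.length
  if lo = lines.length then
    fitFieldFinish (PySem.Chars.join ['\n'] (lines.map String.toList))
  else
    fitFieldFinish (PySem.Chars.join ['\n']
      ((lines.take lo).map String.toList ++ [fitFieldNote ((lines.length : Int) - lo)]))

-- ===== PRECONDITION & SPEC =====
def Spec_fit_field_py (lines : List String) (limit : Int) (out : String) : Prop := out = fit_field_py_alt lines limit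
instance (lines : List String) (limit : Int) (out : String) : Decidable (Spec_fit_field_py lines limit out) := by unfold Spec_fit_field_py; infer_instance

-- ===== CLAIM (what is proved, stated in full; the proofs are below) =====
def Claim_equal_fit_field_py : Prop := ∀ (lines : List String) (limit : Int), Dom_fit_field_py lines limit → Spec_fit_field_py lines limit (fit_field_py lines limit)

-- ===== LEMMAS AND PROOFS =====

-- proof-side linear scan: the first index whose inclusive prefix sum exceeds the budget
def fitFieldCutB (budget : Int) : List String → Nat → Int → Option Nat
  | [], _, _ => none
  | line :: rest, i, total =>
    let t := total + PySem.Str.len line + 1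
    if t > budget then some i else fitFieldCutB budget rest (i + 1) t

theorem fitFieldCutB_le (budget : Int) :
    ∀ (rest : List String) (i : Nat) (t : Int) (j : Nat),
      fitFieldCutB budget rest i t = some j → i ≤ j := by
  intro rest
  induction rest with
  | nil => intro i t j h; simp [fitFieldCutB] at h
  | cons l rs ih =>
    intro i t j h
    simp only [fitFieldCutB] at h
    split at h
    · cases h; omega
    · have := ih (i + 1) _ j h; omega

-- A's loop result, characterised by the linear cutoff scan
theorem fitFieldLoopA_eq (n budget : Int) :
    ∀ (rest : List String) (i : Nat) (acc : List Char),
      fitFieldLoopA n budget rest i acc =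
        match fitFieldCutB budget rest i (acc.length : Int) with
        | none => acc ++ rest.flatMap (fun l => l.toList ++ ['\n'])
        | some j =>
            acc ++ (rest.take (j - i)).flatMap (fun l => l.toList ++ ['\n'])
              ++ fitFieldNote (n - j) := by
  intro rest
  induction rest with
  | nil => intro i acc; simp [fitFieldLoopA, fitFieldCutB]
  | cons l rs ih =>
    intro i acc
    have hlen : PySem.Str.len l = (l.length : Int) := by simp [PySem.Str.len]
    simp only [fitFieldLoopA, fitFieldCutB, hlen]
    by_cases hc : (acc.length : Int) + (l.length : Int) + 1 > budget
    · rw [if_pos (by simp; omega), if_pos (by omega)]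
      simp
    · rw [if_neg (by simp; omega), if_neg (by omega)]
      rw [ih (i + 1) (acc ++ (l.toList ++ ['\n']))]
      have hlen2 : (((acc ++ (l.toList ++ ['\n'])).length : Nat) : Int)
          = (acc.length : Int) + (l.length : Int) + 1 := by simp; omega
      rw [hlen2]
      cases hcut : fitFieldCutB budget rs (i + 1) ((acc.length : Int) + (l.length : Int) + 1) with
      | none => simp
      | some j =>
        have hij : i + 1 ≤ j := fitFieldCutB_le budget rs (i + 1) _ j hcut
        have htake : (l :: rs).take (j - i) = l :: rs.take (j - (i + 1)) := by
          have h1 : j - i = (j - (i + 1)) + 1 := by omega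
          rw [h1, List.take_succ_cons]
        simp [htake]

-- '\n'.join(ps + [q]) is exactly the chunk concatenation of ps followed by q
theorem fitField_join_concat (ps : List (List Char)) (q : List Char) :
    PySem.Chars.join ['\n'] (ps ++ [q]) = ps.flatMap (fun p => p ++ ['\n']) ++ q := by
  induction ps with
  | nil => simp [PySem.Chars.join, List.intercalate]
  | cons a ps ih =>
    cases hps : ps ++ [q] with
    | nil => simp at hps
    | cons b t =>
      rw [List.cons_append, hps, PySem.Chars.join_cons_cons, ← hps, ih]
      simp

theorem fitField_strip_newline (cs : List Char) :
    PySem.Chars.strip (cs ++ ['\n']) = PySem.Chars.strip cs := by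
  simp only [PySem.Chars.strip, PySem.Chars.lstrip, PySem.Chars.rstrip]
  rw [List.dropWhile_append]
  by_cases h : List.dropWhile PySem.Chars.isspace cs = []
  · simp [h, PySem.Chars.isspace]
  · simp [h, PySem.Chars.isspace]

theorem fitField_finish_chunks (ls : List String) :
    fitFieldFinish (ls.flatMap (fun l => l.toList ++ ['\n']))
      = fitFieldFinish (PySem.Chars.join ['\n'] (ls.map String.toList)) := by
  cases hls : ls.eq_nil_or_concat' with
  | inl h => subst h; simp [PySem.Chars.join, List.intercalate]
  | inr h =>
    obtain ⟨ls', a, rfl⟩ := h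
    have h2 : (ls' ++ [a]).flatMap (fun l => l.toList ++ ['\n'])
        = PySem.Chars.join ['\n'] ((ls' ++ [a]).map String.toList) ++ ['\n'] := by
      rw [List.map_append, List.map_singleton, fitField_join_concat]
      simp [List.flatMap_map]
    rw [h2]
    simp only [fitFieldFinish, fitField_strip_newline]

theorem fitCums_length : ∀ (rest : List String) (t : Int), (fitCums rest t).length = rest.length := by
  intro rest
  induction rest with
  | nil => intro t; simp [fitCums]
  | cons l rs ih => intro t; simp [fitCums, ih]

theorem fitCums_ge : ∀ (rest : List String) (t : Int) (x : Int), x ∈ fitCums rest t → t + 1 ≤ x := by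
  intro rest
  induction rest with
  | nil => intro t x h; simp [fitCums] at h
  | cons l rs ih =>
    intro t x h
    have hl : (0 : Int) ≤ (l.length : Int) := by positivity
    have hlen : PySem.Str.len l = (l.length : Int) := by simp [PySem.Str.len]
    simp only [fitCums, hlen, List.mem_cons] at h
    rcases h with h | h
    · omega
    · have := ih _ _ h; omega

theorem fitCums_sorted : ∀ (rest : List String) (t : Int), (fitCums rest t).Pairwise (· ≤ ·) := by
  intro rest
  induction rest with
  | nil => intro t; simp [fitCums]
  | cons l rs ih =>
    intro t
    simp only [fitCums, List.pairwise_cons]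
    exact ⟨fun x hx => by have := fitCums_ge rs _ x hx; omega, ih _⟩

theorem sorted_getD {a : List Int} (hs : a.Pairwise (· ≤ ·)) {i j : Nat}
    (hij : i ≤ j) (hj : j < a.length) : a.getD i 0 ≤ a.getD j 0 := by
  rcases Nat.lt_or_ge i j with h | h
  · have := (List.pairwise_iff_getElem.mp hs) i j (by omega) hj h
    rwa [List.getD_eq_getElem a 0 (by omega), List.getD_eq_getElem a 0 hj]
  · have : i = j := by omega
    subst this; rfl

-- binary-search correctness: the result is THE first index whose entry exceeds x
theorem fitBisect_spec (a : List Int) (x : Int) (hs : a.Pairwise (· ≤ ·)) :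
    ∀ (n lo hi : Nat), hi - lo = n → lo ≤ hi → hi ≤ a.length →
      (∀ k, k < lo → a.getD k 0 ≤ x) →
      (∀ k, hi ≤ k → k < a.length → x < a.getD k 0) →
      fitBisect a x lo hi ≤ a.length ∧
      (∀ k, k < fitBisect a x lo hi → a.getD k 0 ≤ x) ∧
      (∀ k, fitBisect a x lo hi ≤ k → k < a.length → x < a.getD k 0) := by
  intro n
  induction n using Nat.strong_induction_on with
  | _ n ih =>
    intro lo hi hn hlohi hhi hlow hhigh
    by_cases h : lo < hi
    · rw [fitBisect]
      rw [dif_pos h]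
      set mid := (lo + hi) / 2 with hmid
      have hmlt : mid < hi := by omega
      have hmge : lo ≤ mid := by omega
      have hmlen : mid < a.length := by omega
      by_cases hx : x < a.getD mid 0
      · rw [if_pos hx]
        exact ih (mid - lo) (by omega) lo mid rfl (by omega) (by omega) hlow
          (fun k hk hkl => lt_of_lt_of_le hx (sorted_getD hs hk hkl))
      · rw [if_neg hx]
        refine ih (hi - (mid + 1)) (by omega) (mid + 1) hi rfl (by omega) hhi ?_ hhigh
        intro k hk
        rcases Nat.lt_or_ge k lo with h2 | h2
        · exact hlow k h2
        · exact le_trans (sorted_getD hs (by omega : k ≤ mid) hmlen) (by omega)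
    · rw [fitBisect]
      rw [dif_neg h]
      have : lo = hi := by omega
      subst this
      exact ⟨by omega, hlow, hhigh⟩

-- linear cutoff, expressed on the prefix-sum list
theorem fitFieldCutB_some (budget : Int) :
    ∀ (rest : List String) (i : Nat) (t : Int) (j : Nat),
      fitFieldCutB budget rest i t = some j →
      j - i < rest.length ∧ i ≤ j ∧ budget < (fitCums rest t).getD (j - i) 0 ∧
        (∀ k, k < j - i → (fitCums rest t).getD k 0 ≤ budget) := by
  intro rest
  induction rest with
  | nil => intro i t j h; simp [fitFieldCutB] at h
  | cons l rs ih =>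
    intro i t j h
    simp only [fitFieldCutB] at h
    simp only [fitCums]
    split at h
    · rename_i hc
      cases h
      simp only [Nat.sub_self]
      refine ⟨by simp, le_refl _, by simpa using hc, by omega⟩
    · rename_i hc
      obtain ⟨h1, h2, h3, h4⟩ := ih (i + 1) _ j h
      have hji : (i : Nat) + 1 ≤ j := h2
      have hsub : j - i = (j - (i + 1)) + 1 := by omega
      refine ⟨by simp; omega, by omega, ?_, ?_⟩
      · rw [hsub]; simpa using h3
      · intro k hk
        cases k with
        | zero => simpa using le_of_not_gt hc
        | succ m => simp only [List.getD_cons_succ]; exact h4 m (by omega)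

theorem fitFieldCutB_none (budget : Int) :
    ∀ (rest : List String) (i : Nat) (t : Int),
      fitFieldCutB budget rest i t = none →
      ∀ k, k < rest.length → (fitCums rest t).getD k 0 ≤ budget := by
  intro rest
  induction rest with
  | nil => intro i t _ k hk; simp at hk
  | cons l rs ih =>
    intro i t h k hk
    simp only [fitFieldCutB] at h
    split at h
    · exact absurd h (by simp)
    · rename_i hc
      simp only [fitCums]
      cases k with
      | zero => simpa using le_of_not_gt hc
      | succ m => simp only [List.getD_cons_succ]; exact ih (i + 1) _ h m (by simpa using hk)

-- ===== VERDICT (by name: the statement is the Claim_ definition above) =====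
theorem fit_field_py_spec : Claim_equal_fit_field_py := by
  intro lines limit _
  unfold Spec_fit_field_py
  unfold fit_field_py fit_field_py_alt
  rw [fitFieldLoopA_eq]
  simp only [List.length_nil, Nat.cast_zero]
  have hclen : (fitCums lines 0).length = lines.length := fitCums_length lines 0
  obtain ⟨hr1, hr2, hr3⟩ := fitBisect_spec (fitCums lines 0) (limit - 20) (fitCums_sorted lines 0)
    ((fitCums lines 0).length - 0) 0 (fitCums lines 0).length rfl (by omega) (le_refl _)
    (by omega) (by omega)
  set r := fitBisect (fitCums lines 0) (limit - 20) 0 (fitCums lines 0).length with hrdef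
  cases hcut : fitFieldCutB (limit - 20) lines 0 0 with
  | none =>
    have hall := fitFieldCutB_none (limit - 20) lines 0 0 hcut
    have hreq : r = lines.length := by
      by_contra hne
      have hrlt : r < (fitCums lines 0).length := by omega
      exact absurd (hall r (by omega)) (not_le.mpr (hr3 r (le_refl _) hrlt))
    rw [if_pos hreq]
    simpa using fitField_finish_chunks lines
  | some j =>
    obtain ⟨hj1, _, hj3, hj4⟩ := fitFieldCutB_some (limit - 20) lines 0 0 j hcut
    simp only [Nat.sub_zero] at hj1 hj3 hj4
    have hreq : r = j := by
      rcases Nat.lt_trichotomy r j with h | h | h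
      · exact absurd (hj4 r h) (not_le.mpr (hr3 r (le_refl _) (by omega)))
      · exact h
      · exact absurd (hr2 j h) (not_le.mpr hj3)
    rw [if_neg (by omega)]
    rw [hreq]
    rw [fitField_join_concat]
    simp [List.flatMap_map, -List.map_take]
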